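-- pv_equiv track=rewrite | github.com/Shoshan-anjo/NOVALYTICS-BOT | src/robot/analisis.py | _choose_option
-- ===== SOURCE A (Python) =====
-- from typing import Optional, List, Dict, Tuple
--
-- def _choose_option(options: List[Dict[str, str]], preferred: Optional[str], preferred_label: Optional[str]) -> Tuple[Optional[str], Optional[str], str]:
--     """
--     Prioridad:
--       1) value == preferred
--       2) label == preferred_label (case-insensitive)
--       3) primera opción válida (value != '' y !disabled)
--     """
--     if not options:
--         return None, None, "sin-opciones"
--
--     if preferred:
--         for o in options:
--             if o.get("value", "") == preferred:
--                 return o["value"], o.get("label") or o["value"], "value-match"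
--
--     if preferred_label:
--         pref_cf = preferred_label.casefold()
--         for o in options:
--             if (o.get("label") or "").casefold() == pref_cf:
--                 return o["value"], o.get("label") or o["value"], "label-match"
--
--     for o in options:
--         if not o.get("disabled") and (o.get("value") or "") != "":
--             return o["value"], o.get("label") or o["value"], "first-nonempty"
--
--     return None, None, "solo-vacias/disabled"
-- ===== SOURCE B (Python) =====
-- from typing import Optional, List, Dict, Tuple
--
-- def _choose_option(options: List[Dict[str, str]], preferred: Optional[str], preferred_label: Optional[str]) -> Tuple[Optional[str], Optional[str], str]:
--     # Single pass: keep the first candidate of each priority class; a value-match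
--     # dominates everything, so we can stop scanning the moment we see one.
--     if not options:
--         return None, None, "sin-opciones"
--     pref_cf = preferred_label.casefold() if preferred_label else None
--     value_hit = None
--     label_hit = None
--     first_valid = None
--     for o in options:
--         if preferred and o.get("value", "") == preferred:
--             value_hit = o
--             break
--         if pref_cf is not None and label_hit is None and (o.get("label") or "").casefold() == pref_cf:
--             label_hit = o
--         if first_valid is None and not o.get("disabled") and (o.get("value") or "") != "":
--             first_valid = o
--     if value_hit is not None:
--         return value_hit["value"], value_hit.get("label") or value_hit["value"], "value-match"
--     if label_hit is not None:
--         return label_hit["value"], label_hit.get("label") or label_hit["value"], "label-match"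
--     if first_valid is not None:
--         return first_valid["value"], first_valid.get("label") or first_valid["value"], "first-nonempty"
--     return None, None, "solo-vacias/disabled"
-- ===== Notes on version B (the rewrite author's own statement) =====
-- stated objective: alternative
-- what changed: Replaced A's three sequential scans over options by a single pass that maintains one candidate per priority class (breaking early on a value match), with the priority decision made once after the loop.
import Mathlib
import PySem

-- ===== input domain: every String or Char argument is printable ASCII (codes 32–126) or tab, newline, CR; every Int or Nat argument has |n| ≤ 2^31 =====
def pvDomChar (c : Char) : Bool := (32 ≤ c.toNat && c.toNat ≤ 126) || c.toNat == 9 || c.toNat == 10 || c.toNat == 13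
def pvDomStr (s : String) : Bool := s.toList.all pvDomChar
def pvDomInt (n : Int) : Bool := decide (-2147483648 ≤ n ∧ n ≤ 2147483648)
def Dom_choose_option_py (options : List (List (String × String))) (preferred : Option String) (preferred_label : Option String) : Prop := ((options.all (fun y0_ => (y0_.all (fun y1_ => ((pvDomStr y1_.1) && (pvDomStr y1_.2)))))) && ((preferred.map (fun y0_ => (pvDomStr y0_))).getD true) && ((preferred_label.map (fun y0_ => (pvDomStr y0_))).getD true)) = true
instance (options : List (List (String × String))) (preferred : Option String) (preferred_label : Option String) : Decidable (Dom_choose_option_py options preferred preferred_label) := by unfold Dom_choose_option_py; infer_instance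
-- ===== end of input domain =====

-- B: single pass with one candidate per priority class instead of A's three sequential scans (alternative decomposition; return-value equivalence).


-- dict lookup (first matching key), shared by both ports: o.get(k) → pvGet o k, o.get(k, d) → (pvGet o k).getD d
def pvGet (o : List (String × String)) (k : String) : Option String :=
  (o.find? (fun p => p.1 == k)).map (·.2)

-- the common return expression `o["value"], o.get("label") or o["value"], tag` of both Pythons;
-- o["value"] is ported as getD "" — exact under Pre_ (where this is evaluated, the key is present)
def pvRet (o : List (String × String)) (tag : String) : Option String × Option String × String :=
  let v := (pvGet o "value").getD ""
  let l := (pvGet o "label").getD ""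
  (some v, some (if l = "" then v else l), tag)

-- ===== PORT A =====
-- three sequential scans, as in A; `casefold` on the ASCII domain = PySem.Str.lower
def choose_option_py (options : List (List (String × String))) (preferred : Option String) (preferred_label : Option String) : Option String × Option String × String :=
  if options = [] then (none, none, "sin-opciones") else
  match (match preferred with
         | some p => if p = "" then none
                     else options.find? (fun o => (pvGet o "value").getD "" == p)
         | none => none) with
  | some o => pvRet o "value-match"
  | none =>
    match (match preferred_label with
           | some pl => if pl = "" then none
                        else options.find? (fun o => PySem.Str.lower ((pvGet o "label").getD "") == PySem.Str.lower pl)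
           | none => none) with
    | some o => pvRet o "label-match"
    | none =>
      match options.find? (fun o => ((pvGet o "disabled").getD "" == "") && ((pvGet o "value").getD "" != "")) with
      | some o => pvRet o "first-nonempty"
      | none => (none, none, "solo-vacias/disabled")

-- ===== PORT B =====
-- B's per-option tests: `preferred and o.get("value","") == preferred`, the casefolded label test, and validity
def pvPredV (pT : Option String) (o : List (String × String)) : Bool :=
  match pT with | some p => (pvGet o "value").getD "" == p | none => false
def pvPredL (pC : Option String) (o : List (String × String)) : Bool :=
  match pC with | some pc => PySem.Str.lower ((pvGet o "label").getD "") == pc | none => false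
def pvPredF (o : List (String × String)) : Bool :=
  ((pvGet o "disabled").getD "" == "") && ((pvGet o "value").getD "" != "")

-- single pass carrying the first label-match and first valid option; returns at once on a value match
def pvScanB (pT pC : Option String) (labelHit firstValid : Option (List (String × String))) :
    List (List (String × String)) → Option String × Option String × String
  | [] =>
    match labelHit with
    | some o => pvRet o "label-match"
    | none =>
      match firstValid with
      | some o => pvRet o "first-nonempty"
      | none => (none, none, "solo-vacias/disabled")
  | o :: rest =>
    if pvPredV pT o then pvRet o "value-match"
    else
      pvScanB pT pC
        (if labelHit.isNone && pvPredL pC o then some o else labelHit)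
        (if firstValid.isNone && pvPredF o then some o else firstValid)
        rest

def choose_option_py_alt (options : List (List (String × String))) (preferred : Option String) (preferred_label : Option String) : Option String × Option String × String :=
  if options = [] then (none, none, "sin-opciones") else
  pvScanB
    (match preferred with | some p => if p = "" then none else some p | none => none)
    (match preferred_label with | some pl => if pl = "" then none else some (PySem.Str.lower pl) | none => none)
    none none options

-- ===== PRECONDITION & SPEC =====
-- Pre_ excludes exactly the inputs on which Python A raises KeyError: the label-match branch
-- evaluates o["value"] on the first label-matching option, which may lack a "value" key
-- (reached only when no value match fires first). B raises the same KeyError there.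
def pvPreB (options : List (List (String × String))) (preferred : Option String) (preferred_label : Option String) : Bool :=
  match preferred_label with
  | none => true
  | some pl =>
      pl == "" ||
      (match preferred with
       | some p => !(p == "") && options.any (fun o => (pvGet o "value").getD "" == p)
       | none => false) ||
      (match options.find? (fun o => PySem.Str.lower ((pvGet o "label").getD "") == PySem.Str.lower pl) with
       | none => true
       | some o => (pvGet o "value").isSome)
def Pre_choose_option_py (options : List (List (String × String))) (preferred : Option String) (preferred_label : Option String) : Prop :=
  pvPreB options preferred preferred_label = true
instance (options : List (List (String × String))) (preferred : Option String) (preferred_label : Option String) : Decidable (Pre_choose_option_py options preferred preferred_label) := by unfold Pre_choose_option_py; infer_instance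

def pvWitness_choose_option_py : (List (List (String × String))) × Option String × Option String :=
  ([[("value", "a"), ("label", "A")], [("value", "b")]], some "a", some "a")

def Spec_choose_option_py (options : List (List (String × String))) (preferred : Option String) (preferred_label : Option String) (out : Option String × Option String × String) : Prop := out = choose_option_py_alt options preferred preferred_label
instance (options : List (List (String × String))) (preferred : Option String) (preferred_label : Option String) (out : Option String × Option String × String) : Decidable (Spec_choose_option_py options preferred preferred_label out) := by unfold Spec_choose_option_py; infer_instance

-- ===== CLAIM (what is proved, stated in full; the proofs are below) =====
def Claim_equal_choose_option_py : Prop := ∀ (options : List (List (String × String))) (preferred : Option String) (preferred_label : Option String), Dom_choose_option_py options preferred preferred_label → Pre_choose_option_py options preferred preferred_label → Spec_choose_option_py options preferred preferred_label (choose_option_py options preferred preferred_label)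

-- ===== LEMMAS AND PROOFS =====

theorem pvPredV_some (p : String) :
    pvPredV (some p) = fun o => (pvGet o "value").getD "" == p := rfl
theorem pvPredV_none : pvPredV none = fun _ => false := rfl
theorem pvPredL_some (pc : String) :
    pvPredL (some pc) = fun o => PySem.Str.lower ((pvGet o "label").getD "") == pc := rfl
theorem pvPredL_none : pvPredL none = fun _ => false := rfl
theorem pvPredF_eq :
    pvPredF = fun o => ((pvGet o "disabled").getD "" == "") && ((pvGet o "value").getD "" != "") := rfl

theorem find?_const_false {α : Type} (l : List α) : l.find? (fun _ => false) = none := by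
  induction l with
  | nil => rfl
  | cons x xs ih => simp [List.find?, ih]

-- the scan with accumulators computes the same priority decision as three first-match searches
theorem pvScanB_eq (pT pC : Option String) (lh fv : Option (List (String × String)))
    (l : List (List (String × String))) :
    pvScanB pT pC lh fv l =
      match l.find? (pvPredV pT) with
      | some o => pvRet o "value-match"
      | none =>
        match (match lh with | some o => some o | none => l.find? (pvPredL pC)) with
        | some o => pvRet o "label-match"
        | none =>
          match (match fv with | some o => some o | none => l.find? pvPredF) with
          | some o => pvRet o "first-nonempty"
          | none => (none, none, "solo-vacias/disabled") := by
  induction l generalizing lh fv with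
  | nil => cases lh <;> cases fv <;> simp [pvScanB]
  | cons o rest ih =>
    by_cases hv : pvPredV pT o = true
    · simp [pvScanB, hv]
    · rw [show pvScanB pT pC lh fv (o :: rest) =
          pvScanB pT pC
            (if lh.isNone && pvPredL pC o then some o else lh)
            (if fv.isNone && pvPredF o then some o else fv)
            rest from by simp [pvScanB, hv]]
      rw [ih]
      rw [show List.find? (pvPredV pT) (o :: rest) = List.find? (pvPredV pT) rest from by simp [hv]]
      cases lh <;> cases fv <;>
        by_cases hl : pvPredL pC o = true <;>
        by_cases hf : pvPredF o = true <;>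
        simp [hl, hf]

-- ===== VERDICT (by name: the statement is the Claim_ definition above) =====
theorem choose_option_py_spec : Claim_equal_choose_option_py := by
  intro options preferred preferred_label _ _
  unfold Spec_choose_option_py choose_option_py choose_option_py_alt
  by_cases hn : options = []
  · simp [hn]
  · simp only [hn, if_false]
    rw [pvScanB_eq]
    cases preferred with
    | none =>
      cases preferred_label with
      | none => simp [pvPredV_none, pvPredL_none, pvPredF_eq, find?_const_false]
      | some pl =>
        by_cases hpl : pl = "" <;>
          simp [hpl, pvPredV_none, pvPredL_none, pvPredL_some, pvPredF_eq, find?_const_false]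
    | some p =>
      by_cases hp : p = ""
      · cases preferred_label with
        | none => simp [hp, pvPredV_none, pvPredL_none, pvPredF_eq, find?_const_false]
        | some pl =>
          by_cases hpl : pl = "" <;>
            simp [hp, hpl, pvPredV_none, pvPredL_none, pvPredL_some, pvPredF_eq, find?_const_false]
      · cases preferred_label with
        | none => simp [hp, pvPredV_some, pvPredL_none, pvPredF_eq, find?_const_false]
        | some pl =>
          by_cases hpl : pl = "" <;>
            simp [hp, hpl, pvPredV_some, pvPredL_none, pvPredL_some, pvPredF_eq, find?_const_false]
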